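-- pv_equiv track=rewrite | github.com/ilyabuzuev/meander-line | main.py | createCellsMap
-- ===== SOURCE A (Python) =====
-- import math
--
-- def createCellsMap(widthX, widthY):
--   cellsMap = []
--
--   maxRowNum = math.ceil(widthX / 2)
--   mid = math.ceil(widthY / 2)
--
--   for i in range(mid):
--     row = []
--
--     for j in range(widthX):
--       if (i < mid):
--         if (j < maxRowNum):
--           row.append(j + 1 + i)
--         else:
--           row.append(widthX - j + i)
--
--     cellsMap.append(row)
--
--   temp = cellsMap[::-1]
--
--   if (widthY % 2 != 0):
--     temp.pop(0)
--
--   res = cellsMap + temp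
--
--   return res
-- ===== SOURCE B (Python) =====
-- import math
--
-- def createCellsMap(widthX, widthY):
--   maxRowNum = math.ceil(widthX / 2)
--   res = []
--   for r in range(widthY):
--     i = min(r, widthY - 1 - r)
--     res.append([j + 1 + i if j < maxRowNum else widthX - j + i
--                 for j in range(widthX)])
--   return res
-- ===== Notes on version B (the rewrite author's own statement) =====
-- stated objective: simpler
-- what changed: B builds every row in one direct pass with the closed-form symmetry index min(r, widthY-1-r), removing A's build-top-half / reverse / conditional-pop / concatenate mirroring.
-- outside the precondition, e.g. on createCellsMap(3, -1): A raises IndexError, B returns []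
import Mathlib
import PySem

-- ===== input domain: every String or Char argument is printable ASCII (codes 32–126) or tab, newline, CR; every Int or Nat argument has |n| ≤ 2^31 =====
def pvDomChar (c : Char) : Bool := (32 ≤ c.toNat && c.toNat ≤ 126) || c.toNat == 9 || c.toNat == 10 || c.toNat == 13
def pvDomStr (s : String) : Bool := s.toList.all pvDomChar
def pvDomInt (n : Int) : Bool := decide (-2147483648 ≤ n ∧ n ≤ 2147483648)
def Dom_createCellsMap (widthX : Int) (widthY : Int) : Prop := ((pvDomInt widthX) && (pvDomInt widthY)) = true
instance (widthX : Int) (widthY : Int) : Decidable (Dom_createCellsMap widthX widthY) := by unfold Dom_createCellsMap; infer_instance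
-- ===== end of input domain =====

-- B builds the whole grid in one direct pass using the symmetry index min(r, widthY-1-r),
-- eliminating A's reverse/pop/concat mirroring step (objective: simpler).

-- ===== PORT A =====
-- math.ceil(x / 2) on an int with |x| ≤ 2^31: float division is exact (< 2^53), and
-- ceil(x/2) = (x+1)//2, i.e. PySem.Int.floordiv (x+1) 2.
def createCellsMap (widthX : Int) (widthY : Int) : List (List Int) :=
  let maxRowNum := PySem.Int.floordiv (widthX + 1) 2
  let mid := PySem.Int.floordiv (widthY + 1) 2
  let cellsMap := (PySem.List.pyRange 0 mid 1).foldl (fun m i =>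
    let row := (PySem.List.pyRange 0 widthX 1).foldl (fun row j =>
      if i < mid then
        (if j < maxRowNum then row ++ [j + 1 + i] else row ++ [widthX - j + i])
      else row) []
    m ++ [row]) []
  let temp := cellsMap.reverse   -- cellsMap[::-1]  (PySem.List.slice?_none_none_neg_one)
  if PySem.Int.mod widthY 2 ≠ 0 then
    match PySem.List.pop? temp 0 with
    | some (_, t) => cellsMap ++ t
    | none => []   -- temp.pop(0) raises IndexError on empty temp: excluded by Pre_
  else cellsMap ++ temp

-- ===== PORT B =====
def createCellsMap_alt (widthX : Int) (widthY : Int) : List (List Int) :=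
  let maxRowNum := PySem.Int.floordiv (widthX + 1) 2
  (PySem.List.pyRange 0 widthY 1).map (fun r =>
    let i := min r (widthY - 1 - r)
    (PySem.List.pyRange 0 widthX 1).map (fun j =>
      if j < maxRowNum then j + 1 + i else widthX - j + i))

-- ===== PRECONDITION & SPEC =====
-- Pre_ excludes odd negative widthY (e.g. widthY = -1), where A's `temp.pop(0)` raises
-- IndexError on the empty list; B returns [] there.
def Pre_createCellsMap (widthX : Int) (widthY : Int) : Prop :=
  0 ≤ widthY ∨ PySem.Int.mod widthY 2 = 0
instance (widthX : Int) (widthY : Int) : Decidable (Pre_createCellsMap widthX widthY) := by unfold Pre_createCellsMap; infer_instance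
def pvWitness_createCellsMap : Int × Int := (5, 5)

def Spec_createCellsMap (widthX : Int) (widthY : Int) (out : List (List Int)) : Prop := out = createCellsMap_alt widthX widthY
instance (widthX : Int) (widthY : Int) (out : List (List Int)) : Decidable (Spec_createCellsMap widthX widthY out) := by unfold Spec_createCellsMap; infer_instance

-- ===== CLAIM (what is proved, stated in full; the proofs are below) =====
def Claim_equal_createCellsMap : Prop := ∀ (widthX : Int) (widthY : Int), Dom_createCellsMap widthX widthY → Pre_createCellsMap widthX widthY → Spec_createCellsMap widthX widthY (createCellsMap widthX widthY)

-- ===== LEMMAS AND PROOFS =====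

-- the common per-cell row, as a map
def pvRow (widthX i : Int) : List Int :=
  (PySem.List.pyRange 0 widthX 1).map (fun j =>
    if j < PySem.Int.floordiv (widthX + 1) 2 then j + 1 + i else widthX - j + i)

lemma pvCellsMap_eq_map (widthX mid : Int) :
    (PySem.List.pyRange 0 mid 1).foldl (fun m i =>
      let row := (PySem.List.pyRange 0 widthX 1).foldl (fun row j =>
        if i < mid then
          (if j < PySem.Int.floordiv (widthX + 1) 2 then row ++ [j + 1 + i] else row ++ [widthX - j + i])
        else row) []
      m ++ [row]) []
    = (PySem.List.pyRange 0 mid 1).map (pvRow widthX) := by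
  have h1 : ∀ (i : Int), i ∈ PySem.List.pyRange 0 mid 1 →
      (PySem.List.pyRange 0 widthX 1).foldl (fun row j =>
        if i < mid then
          (if j < PySem.Int.floordiv (widthX + 1) 2 then row ++ [j + 1 + i] else row ++ [widthX - j + i])
        else row) [] = pvRow widthX i := by
    intro i hi
    have hlt : i < mid := ((PySem.List.mem_pyRange_one).1 hi).2
    simp only [hlt, if_true]
    have : (fun (row : List Int) j =>
        if j < PySem.Int.floordiv (widthX + 1) 2 then row ++ [j + 1 + i] else row ++ [widthX - j + i])
        = fun row j => row ++ [if j < PySem.Int.floordiv (widthX + 1) 2 then j + 1 + i else widthX - j + i] := by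
      funext row j; split <;> rfl
    rw [this, PySem.List.foldl_append_singleton_eq_map]
    rfl
  calc (PySem.List.pyRange 0 mid 1).foldl (fun m i =>
        let row := (PySem.List.pyRange 0 widthX 1).foldl (fun row j =>
          if i < mid then
            (if j < PySem.Int.floordiv (widthX + 1) 2 then row ++ [j + 1 + i] else row ++ [widthX - j + i])
          else row) []
        m ++ [row]) []
      = (PySem.List.pyRange 0 mid 1).foldl (fun m i => m ++ [pvRow widthX i]) [] := by
        apply PySem.List.foldl_congr_mem
        intro acc i hi
        simp only [h1 i hi]
    _ = (PySem.List.pyRange 0 mid 1).map (pvRow widthX) := by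
        rw [PySem.List.foldl_append_singleton_eq_map]; rfl

lemma pvMain (wx wy : Int) (h : 0 ≤ wy ∨ PySem.Int.mod wy 2 = 0) :
    (let mid := PySem.Int.floordiv (wy + 1) 2
     let M := (PySem.List.pyRange 0 mid 1).map (pvRow wx)
     let temp := M.reverse
     if PySem.Int.mod wy 2 ≠ 0 then
       match PySem.List.pop? temp 0 with
       | some (_, t) => M ++ t
       | none => []
     else M ++ temp)
    = (PySem.List.pyRange 0 wy 1).map (fun r => pvRow wx (min r (wy - 1 - r))) := by
  have hmod : PySem.Int.mod wy 2 = wy % 2 := PySem.Int.mod_eq_emod_of_pos (by norm_num)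
  have hmid : PySem.Int.floordiv (wy + 1) 2 = (wy + 1) / 2 := PySem.Int.floordiv_eq_ediv_of_pos (by norm_num)
  simp only [hmod, hmid]
  set mid := (wy + 1) / 2 with hm
  set M := (PySem.List.pyRange 0 mid 1).map (pvRow wx) with hM
  have hMlen : M.length = mid.toNat := by
    simp [hM, PySem.List.length_pyRange_one]
  have hMget : ∀ (k : Nat) (hk : k < M.length), M[k] = pvRow wx (0 + (k : Int)) := by
    intro k hk
    simp only [hM, List.getElem_map]
    rw [PySem.List.getElem_pyRange_one]
  by_cases hodd : wy % 2 = 0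
  · -- even branch
    rw [if_neg (by simp [hodd])]
    apply List.ext_getElem
    · simp [hMlen, PySem.List.length_pyRange_one]; omega
    · intro k h1 h2
      rw [List.getElem_append]
      rw [List.getElem_map, PySem.List.getElem_pyRange_one]
      split
      · rename_i hk
        rw [hMget k hk]
        congr 1
        rw [hMlen] at hk
        simp only [List.length_append, List.length_reverse, List.length_map,
          PySem.List.length_pyRange_one, hMlen] at h1 h2
        omega
      · rename_i hk
        rw [List.getElem_reverse, hMget]
        congr 1
        simp only [List.length_append, List.length_reverse, List.length_map,
          PySem.List.length_pyRange_one, hMlen] at h1 h2 hk ⊢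
        omega
  · -- odd branch
    rw [if_pos (by simp [hodd])]
    have hwy : 1 ≤ wy := by rcases h with h | h; omega; omega
    have hmid1 : 1 ≤ mid := by omega
    have hMne : M.reverse ≠ [] := by
      intro hc
      have hlc := congrArg List.length hc
      simp only [List.length_reverse, hMlen, List.length_nil] at hlc
      omega
    obtain ⟨x, t, hxt⟩ : ∃ x t, M.reverse = x :: t := by
      cases hrev : M.reverse with
      | nil => exact absurd hrev hMne
      | cons a b => exact ⟨a, b, rfl⟩
    rw [hxt]
    have hpop : PySem.List.pop? (x :: t) 0 = some (x, t) := by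
      simp [PySem.List.pop?, PySem.List.pyIdx?]
    rw [hpop]
    have ht : t = M.reverse.tail := by rw [hxt]; rfl
    rw [ht]

    apply List.ext_getElem
    · simp [hMlen, PySem.List.length_pyRange_one]; omega
    · intro k h1 h2
      rw [List.getElem_append]
      rw [List.getElem_map, PySem.List.getElem_pyRange_one]
      split
      · rename_i hk
        rw [hMget k hk]
        congr 1
        rw [hMlen] at hk
        simp only [List.length_append, List.length_reverse, List.length_tail, List.length_map,
          PySem.List.length_pyRange_one, hMlen] at h1 h2
        omega
      · rename_i hk
        rw [List.getElem_tail, List.getElem_reverse, hMget]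
        congr 1
        simp only [List.length_append, List.length_reverse, List.length_tail, List.length_map,
          PySem.List.length_pyRange_one, hMlen] at h1 h2 hk ⊢
        omega

-- ===== VERDICT (by name: the statement is the Claim_ definition above) =====
theorem createCellsMap_spec : Claim_equal_createCellsMap := by
  intro wx wy _ hpre
  unfold Spec_createCellsMap createCellsMap createCellsMap_alt
  simp only [pvCellsMap_eq_map]
  exact pvMain wx wy hpre
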